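-- pv_equiv track=rewrite | github.com/CogSci-hiro/dyana | src/dyana/decode/decoder.py | decode_diagnostics
-- ===== SOURCE A (Python) =====
-- from typing import Dict, Iterable, List, Optional, Sequence, Tuple
--
-- def decode_diagnostics(states: Sequence[str]) -> Dict[str, int]:
--     """
--     Compute deterministic counters from decoded base-state sequence.
--
--     Returns
--     -------
--     dict
--         Contains ``ipu_start_after_leak_count``.
--     """
--
--     ipu_start_after_leak_count = 0
--     if not states:
--         return {"ipu_start_after_leak_count": 0}
--
--     run_starts: List[int] = [0]
--     for idx in range(1, len(states)):
--         if states[idx] != states[idx - 1]: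
--             run_starts.append(idx)
--
--     for run_start in run_starts:
--         label = states[run_start]
--         if label == "SIL":
--             continue
--         prev_idx = run_start - 1
--         if prev_idx >= 0 and states[prev_idx] == "LEAK":
--             ipu_start_after_leak_count += 1
--
--     return {"ipu_start_after_leak_count": ipu_start_after_leak_count}
-- ===== SOURCE B (Python) =====
-- def decode_diagnostics(states):
--     count = sum(
--         1
--         for prev, cur in zip(states, states[1:])
--         if prev == "LEAK" and cur != "LEAK" and cur != "SIL"
--     )
--     return {"ipu_start_after_leak_count": count}
-- ===== Notes on version B (the rewrite author's own statement) =====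
-- stated objective: simpler
-- what changed: Drops A's intermediate run_starts index list and its two sequential index loops; B does one zip scan over adjacent pairs counting LEAK-to-(non-LEAK, non-SIL) transitions, which are exactly the non-SIL run starts preceded by LEAK.
import Mathlib
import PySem

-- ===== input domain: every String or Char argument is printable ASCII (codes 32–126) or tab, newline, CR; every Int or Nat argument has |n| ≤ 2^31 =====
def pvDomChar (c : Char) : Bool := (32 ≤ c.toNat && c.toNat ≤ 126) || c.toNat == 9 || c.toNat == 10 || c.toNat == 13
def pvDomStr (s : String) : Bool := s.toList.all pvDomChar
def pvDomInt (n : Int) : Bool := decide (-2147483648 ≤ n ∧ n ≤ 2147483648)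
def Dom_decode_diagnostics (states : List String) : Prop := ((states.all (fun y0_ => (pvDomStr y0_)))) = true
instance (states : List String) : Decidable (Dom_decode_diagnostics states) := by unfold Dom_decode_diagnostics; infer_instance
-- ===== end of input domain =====

-- B replaces A's run_starts index list and its two index loops with a single zip scan
-- over adjacent pairs (objective: simpler). Both are total; return-value equivalence.

-- ===== PORT A =====
-- literal port: run_starts built by the first loop, then the counting loop over it
def decode_diagnostics (states : List String) : List (String × Int) :=
  if states = [] then [("ipu_start_after_leak_count", 0)]
  else
    let runStarts : List Int :=
      (PySem.List.pyRange 1 (states.length : Int) 1).foldl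
        (fun acc idx =>
          if PySem.List.pyGetD states idx "" ≠ PySem.List.pyGetD states (idx - 1) "" then
            acc ++ [idx]
          else acc) [0]
    let cnt : Int :=
      runStarts.foldl
        (fun c r =>
          if PySem.List.pyGetD states r "" == "SIL" then c
          else if 0 ≤ r - 1 then
            if PySem.List.pyGetD states (r - 1) "" == "LEAK" then c + 1 else c
          else c) 0
    [("ipu_start_after_leak_count", cnt)]

-- ===== PORT B =====
def decode_diagnostics_alt (states : List String) : List (String × Int) :=
  let count : Int :=
    ((states.zip (states.drop 1)).countP
      (fun pc => pc.1 == "LEAK" && pc.2 != "LEAK" && pc.2 != "SIL") : Nat)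
  [("ipu_start_after_leak_count", count)]

-- ===== PRECONDITION & SPEC =====
def Spec_decode_diagnostics (states : List String) (out : List (String × Int)) : Prop := out = decode_diagnostics_alt states
instance (states : List String) (out : List (String × Int)) : Decidable (Spec_decode_diagnostics states out) := by unfold Spec_decode_diagnostics; infer_instance

-- ===== CLAIM (what is proved, stated in full; the proofs are below) =====
def Claim_equal_decode_diagnostics : Prop := ∀ (states : List String), Dom_decode_diagnostics states → Spec_decode_diagnostics states (decode_diagnostics states)

-- ===== LEMMAS AND PROOFS =====

-- the adjacent-pairs list seen through A's indices equals B's zip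
theorem pairs_map_eq_zip (l : List String) :
    (PySem.List.pyRange 1 (l.length : Int) 1).map
      (fun idx => (PySem.List.pyGetD l (idx - 1) "", PySem.List.pyGetD l idx "")) =
    l.zip (l.drop 1) := by
  apply List.ext_getElem
  · simp [PySem.List.length_pyRange_one, List.length_zip]
  · intro k h1 h2
    have hk : k < l.length - 1 := by
      simpa [PySem.List.length_pyRange_one] using h1
    rw [List.getElem_map, PySem.List.getElem_pyRange_one]
    have e1 : (1 : Int) + k - 1 = (k : Int) := by ring
    have e2 : (1 : Int) + k = ((k + 1 : Nat) : Int) := by push_cast; ring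
    rw [e1, e2, PySem.List.pyGetD_natCast, PySem.List.pyGetD_natCast,
        List.getElem_zip]
    simp [List.getD_eq_getElem?_getD, List.getElem?_eq_getElem (by omega : k < l.length),
      List.getElem?_eq_getElem (by omega : k + 1 < l.length)]

theorem decode_diagnostics_spec : Claim_equal_decode_diagnostics := by
  intro states _
  unfold Spec_decode_diagnostics decode_diagnostics decode_diagnostics_alt
  by_cases hnil : states = []
  · subst hnil; simp
  · simp only [if_neg hnil]
    -- first loop: run_starts = 0 :: (filtered range)
    rw [PySem.List.foldl_append_ite_eq_filter]
    -- second loop: rewrite the nested ifs into a single counting if, then countP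
    have hstep :
        (fun (c : Int) (r : Int) =>
          if PySem.List.pyGetD states r "" == "SIL" then c
          else if 0 ≤ r - 1 then
            if PySem.List.pyGetD states (r - 1) "" == "LEAK" then c + 1 else c
          else c) =
        (fun (c : Int) (r : Int) =>
          if (PySem.List.pyGetD states r "" != "SIL" && decide (0 ≤ r - 1) &&
              (PySem.List.pyGetD states (r - 1) "" == "LEAK")) then c + 1 else c) := by
      funext c r
      by_cases h1 : PySem.List.pyGetD states r "" = "SIL" <;>
        by_cases h2 : (0 : Int) ≤ r - 1 <;>
          by_cases h3 : PySem.List.pyGetD states (r - 1) "" = "LEAK" <;>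
            simp_all
    rw [hstep, PySem.List.foldl_if_add_one]
    have h0 : decide ((0:Int) ≤ 0 - 1) = false := by decide
    simp only [List.countP_append, List.countP_cons, List.countP_nil, List.countP_filter,
      h0, Bool.and_false, Bool.false_and, zero_add]
    -- pointwise on the range: A's counted predicate equals B's transition predicate
    have hcong :
        (PySem.List.pyRange 1 (states.length : Int) 1).countP
          (fun r => (PySem.List.pyGetD states r "" != "SIL" && decide (0 ≤ r - 1) &&
              (PySem.List.pyGetD states (r - 1) "" == "LEAK")) &&
            decide (PySem.List.pyGetD states r "" ≠ PySem.List.pyGetD states (r - 1) "")) =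
        (PySem.List.pyRange 1 (states.length : Int) 1).countP
          (fun r =>
            (fun pc : String × String => pc.1 == "LEAK" && pc.2 != "LEAK" && pc.2 != "SIL")
              ((fun idx => (PySem.List.pyGetD states (idx - 1) "", PySem.List.pyGetD states idx "")) r)) := by
      apply List.countP_congr
      intro r hr
      have hb := (PySem.List.mem_pyRange_one.mp hr)
      have h2 : (0 : Int) ≤ r - 1 := by omega
      simp only [h2, decide_true, Bool.and_true]
      by_cases hp : PySem.List.pyGetD states (r - 1) "" = "LEAK" <;>
        by_cases hc : PySem.List.pyGetD states r "" = "LEAK" <;>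
          by_cases hs : PySem.List.pyGetD states r "" = "SIL" <;>
            simp_all
    have hm := List.countP_map
      (p := fun pc : String × String => pc.1 == "LEAK" && pc.2 != "LEAK" && pc.2 != "SIL")
      (f := fun idx : Int => (PySem.List.pyGetD states (idx - 1) "", PySem.List.pyGetD states idx ""))
      (l := PySem.List.pyRange 1 (states.length : Int) 1)
    simp only [Function.comp_def] at hm
    rw [hcong, ← hm, pairs_map_eq_zip]
    simp

-- ===== VERDICT (by name: the statement is the Claim_ definition above) =====
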